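-- pv_equiv track=rewrite | github.com/unraiders/check-torrents-client | utils.py | format_torrents_agrupados
-- ===== SOURCE A (Python) =====
-- def format_torrents_agrupados(torrents_con_tracker, emoji):
--     """
--     Formatea una lista de torrents agrupados por tracker.
--
--     Args:
--         torrents_con_tracker: Lista de tuplas (nombre_torrent, dominio_tracker)
--         emoji: Emoji a usar para cada torrent
--
--     Returns:
--         str: Mensaje formateado con torrents agrupados por tracker
--     """
--     from collections import defaultdict
--
--     # Agrupar torrents por tracker
--     trackers_dict = defaultdict(list)
--     for nombre, tracker in torrents_con_tracker:
--         trackers_dict[tracker].append(nombre)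
--
--     # Construir mensaje agrupado
--     message_parts = []
--     for tracker, nombres in sorted(trackers_dict.items()):
--         tracker_section = f"\n\n<b>Tracker:</b> {tracker}\n<b>Torrents:</b>"
--         for nombre in nombres:
--             tracker_section += f"\n\n{emoji} {nombre}"
--         message_parts.append(tracker_section)
--
--     return "".join(message_parts)
-- ===== SOURCE B (Python) =====
-- def format_torrents_agrupados(torrents_con_tracker, emoji):
--     trackers = sorted({tracker for _, tracker in torrents_con_tracker})
--     return "".join(
--         f"\n\n<b>Tracker:</b> {tracker}\n<b>Torrents:</b>"
--         + "".join(
--             f"\n\n{emoji} {nombre}"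
--             for nombre, t in torrents_con_tracker
--             if t == tracker
--         )
--         for tracker in trackers
--     )
-- ===== Notes on version B (the rewrite author's own statement) =====
-- stated objective: idiomatic
-- what changed: Replaces the defaultdict-of-lists grouping pass plus dict-items sort with a single expression: sort the distinct trackers once, then build each section by filtering the input list per tracker.
import Mathlib
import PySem

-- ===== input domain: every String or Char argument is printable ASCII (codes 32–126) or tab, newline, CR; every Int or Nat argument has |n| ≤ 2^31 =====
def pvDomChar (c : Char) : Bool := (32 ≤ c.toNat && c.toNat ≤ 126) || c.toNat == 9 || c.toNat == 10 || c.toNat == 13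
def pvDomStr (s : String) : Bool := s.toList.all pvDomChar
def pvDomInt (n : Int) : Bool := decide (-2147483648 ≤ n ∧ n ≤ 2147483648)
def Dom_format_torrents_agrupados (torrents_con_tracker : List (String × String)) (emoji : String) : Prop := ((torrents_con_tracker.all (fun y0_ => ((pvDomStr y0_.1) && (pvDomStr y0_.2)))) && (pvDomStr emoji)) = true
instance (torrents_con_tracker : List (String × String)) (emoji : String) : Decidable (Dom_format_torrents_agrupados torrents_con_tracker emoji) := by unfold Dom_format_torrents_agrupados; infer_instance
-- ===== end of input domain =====

-- B replaces the defaultdict grouping + items sort with sorted(set of trackers) and a filter per tracker (idiomatic single expression).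


-- ===== PORT A =====
-- sorted(trackers_dict.items()) compares (tracker, names) tuples; dict keys are distinct,
-- so the tuple comparison never reaches the second component: ported as a stable sort on the key.
def format_torrents_agrupados (torrents_con_tracker : List (String × String)) (emoji : String) : String :=
  let trackers_dict : PySem.Dict String (List String) :=
    torrents_con_tracker.foldl (fun d p => d.modify p.2 [] (· ++ [p.1])) PySem.Dict.empty
  let message_parts : List String :=
    (PySem.List.sorted trackers_dict.items (fun p => p.1) false).foldl
      (fun acc p =>
        acc ++ [p.2.foldl (fun sec nombre => sec ++ ("\n\n" ++ emoji ++ " " ++ nombre))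
                  ("\n\n<b>Tracker:</b> " ++ p.1 ++ "\n<b>Torrents:</b>")])
      []
  PySem.Str.join "" message_parts

-- ===== PORT B =====
def format_torrents_agrupados_alt (torrents_con_tracker : List (String × String)) (emoji : String) : String :=
  let trackers : List String :=
    PySem.List.sorted (PySem.Set.ofList (torrents_con_tracker.map (·.2))) (fun t => t) false
  PySem.Str.join ""
    (trackers.map (fun tracker =>
      "\n\n<b>Tracker:</b> " ++ tracker ++ "\n<b>Torrents:</b>" ++
        PySem.Str.join ""
          ((torrents_con_tracker.filter (fun p => p.2 == tracker)).map
            (fun p => "\n\n" ++ emoji ++ " " ++ p.1))))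

-- ===== PRECONDITION & SPEC =====
def Spec_format_torrents_agrupados (torrents_con_tracker : List (String × String)) (emoji : String) (out : String) : Prop := out = format_torrents_agrupados_alt torrents_con_tracker emoji
instance (torrents_con_tracker : List (String × String)) (emoji : String) (out : String) : Decidable (Spec_format_torrents_agrupados torrents_con_tracker emoji out) := by unfold Spec_format_torrents_agrupados; infer_instance

-- ===== CLAIM (what is proved, stated in full; the proofs are below) =====
def Claim_equal_format_torrents_agrupados : Prop := ∀ (torrents_con_tracker : List (String × String)) (emoji : String), Dom_format_torrents_agrupados torrents_con_tracker emoji → Spec_format_torrents_agrupados torrents_con_tracker emoji (format_torrents_agrupados torrents_con_tracker emoji)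

-- ===== LEMMAS AND PROOFS =====

theorem pv_flatten_intersperse {α : Type} (l : List (List α)) :
    (l.intersperse []).flatten = l.flatten := by
  induction l with
  | nil => rfl
  | cons a t ih =>
    cases t with
    | nil => rfl
    | cons b t2 =>
      simp only [List.intersperse] at ih ⊢
      simp [ih]

theorem pv_join_empty_nil : PySem.Str.join "" ([] : List String) = "" := by
  simp [PySem.Str.join]

theorem pv_join_empty_cons (a : String) (l : List String) :
    PySem.Str.join "" (a :: l) = a ++ PySem.Str.join "" l := by
  simp [PySem.Str.join, PySem.Chars.join, List.intercalate, pv_flatten_intersperse,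
    String.ofList_append, String.ofList_toList]

-- the string-accumulating inner loop of A is header ++ concatenation
theorem pv_foldl_str_append {α : Type} (f : α → String) (l : List α) (acc : String) :
    l.foldl (fun s x => s ++ f x) acc = acc ++ PySem.Str.join "" (l.map f) := by
  induction l generalizing acc with
  | nil => simp [pv_join_empty_nil]
  | cons x xs ih =>
    simp only [List.foldl_cons, List.map_cons, pv_join_empty_cons, ih, String.append_assoc]

-- the grouped dict's value at each tracker
theorem pv_getD_group (ts : List (String × String)) (k : String) :
    (ts.foldl (fun d p => d.modify p.2 [] (· ++ [p.1])) PySem.Dict.empty).getD k []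
      = (ts.filter (fun p => p.2 == k)).map (·.1) := by
  have h : ts.foldl (fun d p => d.modify p.2 [] (· ++ [p.1])) PySem.Dict.empty
      = (ts.map Prod.swap).foldl (fun d p => d.modify p.1 [] (· ++ [p.2])) PySem.Dict.empty := by
    rw [List.foldl_map]
    rfl
  rw [h, PySem.Dict.getD_foldl_modify_append]
  rw [List.filter_map, List.map_map]
  rfl

-- the grouped dict's items list
theorem pv_items_group (ts : List (String × String)) :
    (ts.foldl (fun d p => d.modify p.2 [] (· ++ [p.1])) PySem.Dict.empty).items
      = (PySem.Set.ofList (ts.map (·.2))).map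
          (fun k => (k, (ts.filter (fun p => p.2 == k)).map (·.1))) := by
  have hkeys : (ts.foldl (fun d p => d.modify p.2 [] (· ++ [p.1])) PySem.Dict.empty).keys
      = PySem.Set.ofList (ts.map (·.2)) := by
    rw [PySem.Dict.keys_foldl_modify_key]
    simp [PySem.Set.update_nil_left]
  have hnd : (ts.foldl (fun d p => d.modify p.2 [] (· ++ [p.1])) PySem.Dict.empty).keys.Nodup := by
    apply PySem.Dict.nodup_keys_foldl_modify_key
    simp
  rw [PySem.Dict.items_eq_map_keys _ hnd ([] : List String), hkeys]
  refine List.map_congr_left ?_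
  intro k _
  rw [pv_getD_group]

-- the grouped dict's items, sorted by key
theorem pv_sorted_items (ts : List (String × String)) :
    PySem.List.sorted
      (ts.foldl (fun d p => d.modify p.2 [] (· ++ [p.1])) PySem.Dict.empty).items
      (fun p => p.1) false
    = (PySem.List.sorted (PySem.Set.ofList (ts.map (·.2))) (fun t => t) false).map
        (fun k => (k, (ts.filter (fun p => p.2 == k)).map (·.1))) := by
  rw [pv_items_group]
  apply PySem.List.sorted_eq_of_perm_of_pairwise_lt
  · exact (PySem.List.sorted_perm _ _ _).map _
  · have := PySem.List.sorted_ofList_pairwise_lt (xs := ts.map (·.2))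
    rw [List.pairwise_map]
    exact this

-- ===== VERDICT (by name: the statement is the Claim_ definition above) =====
theorem format_torrents_agrupados_spec : Claim_equal_format_torrents_agrupados := by
  intro ts emoji _
  unfold Spec_format_torrents_agrupados format_torrents_agrupados format_torrents_agrupados_alt
  simp only [pv_sorted_items, PySem.List.foldl_append_singleton_eq_map, List.map_map,
    pv_foldl_str_append, List.nil_append]
  congr 1
  refine List.map_congr_left ?_
  intro k _
  simp [Function.comp, List.map_map]
  rfl
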